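-- pv_equiv track=rewrite | github.com/Omar-Assem1/Control-Project | signal-flow-graph-backend/app/services/graph_visualizer.py | _bfs_layers
-- ===== SOURCE A (Python) =====
-- from collections import defaultdict, deque
-- from typing import Any
--
-- def _bfs_layers(
--     source: Any,
--     adj: dict[Any, dict[Any, Any]],
--     all_nodes: list[Any],
-- ) -> dict[Any, int]:
--     """
--     Assign a *column index* (0-based) to each node via BFS from source.
--     Nodes unreachable from source are placed in the last column.
--     """
--     layer: dict[Any, int] = {source: 0}
--     queue = deque([source])
--
--     while queue:
--         node = queue.popleft()
--         for neighbor in adj.get(node, {}):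
--             if neighbor not in layer:
--                 layer[neighbor] = layer[node] + 1
--                 queue.append(neighbor)
--
--     # Assign unreachable nodes to last layer
--     max_layer = max(layer.values(), default=0)
--     for n in all_nodes:
--         if n not in layer:
--             max_layer += 1
--             layer[n] = max_layer
--
--     return layer
-- ===== SOURCE B (Python) =====
-- def _bfs_layers(source, adj, all_nodes):
--     # Recursive level expansion building the (node, column) pair list directly:
--     # no dict during traversal, only a visited set; depth falls out of the recursion.
--     def expand(frontier, seen, level):
--         nxt = []
--         for u in frontier:
--             for v in adj.get(u, {}):
--                 if v not in seen:
--                     seen.add(v)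
--                     nxt.append(v)
--         if not nxt:
--             return [], level
--         deeper, depth = expand(nxt, seen, level + 1)
--         return [(v, level + 1) for v in nxt] + deeper, depth
--
--     seen = {source}
--     rest, depth = expand([source], seen, 0)
--     pairs = [(source, 0)] + rest
--     missing = []
--     for n in all_nodes:
--         if n not in seen:
--             seen.add(n)
--             missing.append(n)
--     return dict(pairs + [(n, depth + 1 + i) for i, n in enumerate(missing)])
-- ===== Notes on version B (the rewrite author's own statement) =====
-- stated objective: alternative
-- what changed: Replaces the mutable-dict queue BFS (deque, layer[node]+1 lookups, max over dict values, in-place tail inserts) with a recursive level-expansion that keeps only a visited set, returns the (node, column) pair list directly together with the depth from the recursion, and appends the unreachable nodes as an enumerated tail list; the dict is built once at the end.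
import Mathlib
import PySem

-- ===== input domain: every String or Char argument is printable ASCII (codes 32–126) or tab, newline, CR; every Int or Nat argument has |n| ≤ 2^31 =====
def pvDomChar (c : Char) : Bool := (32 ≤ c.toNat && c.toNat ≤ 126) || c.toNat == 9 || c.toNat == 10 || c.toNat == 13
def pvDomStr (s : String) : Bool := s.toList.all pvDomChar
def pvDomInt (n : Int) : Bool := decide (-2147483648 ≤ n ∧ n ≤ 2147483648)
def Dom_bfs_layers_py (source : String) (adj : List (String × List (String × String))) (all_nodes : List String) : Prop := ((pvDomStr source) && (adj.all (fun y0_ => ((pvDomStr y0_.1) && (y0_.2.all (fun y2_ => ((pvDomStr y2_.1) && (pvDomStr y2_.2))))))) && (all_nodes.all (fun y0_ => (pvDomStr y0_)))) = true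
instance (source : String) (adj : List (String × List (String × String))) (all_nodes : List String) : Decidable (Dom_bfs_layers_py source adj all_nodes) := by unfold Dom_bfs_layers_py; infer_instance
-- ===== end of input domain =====

-- B replaces A's mutable-dict queue BFS (deque, layer[node]+1 lookups, max over dict values,
-- in-place tail inserts) by a recursive level expansion that keeps only a visited set, builds the
-- (node, column) pair list directly and obtains the depth from the recursion; the unreachable
-- nodes are appended as an enumerated tail list (alternative decomposition, no speed claim).

-- ===== PORT A =====
-- neighbors iterated by `for neighbor in adj.get(node, {})`: the keys of the inner dict, in order
def pvNbrs (adjD : PySem.Dict String (List (String × String))) (node : String) : List String :=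
  (adjD.getD node []).map Prod.fst

-- one queue step of A: fold over the neighbors of `node`, state = (layer, queue-after-pop);
-- `layer[node]` is ported as `getD node 0` — exact here since node is always a key of layer
def pvStepA (adjD : PySem.Dict String (List (String × String)))
    (s : PySem.Dict String Int × List String) (node : String) :
    PySem.Dict String Int × List String :=
  (pvNbrs adjD node).foldl
    (fun s nb => if s.1.contains nb then s
                 else (s.1.insert nb (s.1.getD node 0 + 1), s.2 ++ [nb]))
    s

-- `while queue:` with fuel; fuel = 1 + total neighbor-entry count bounds the number of pops
-- (each pop after the first is a prior fresh insertion), so the 0-fuel branch is never reached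
def pvBfsA (adjD : PySem.Dict String (List (String × String))) :
    Nat → PySem.Dict String Int → List String → PySem.Dict String Int
  | _, layer, [] => layer
  | 0, layer, _ :: _ => layer
  | n + 1, layer, node :: rest =>
      let s := pvStepA adjD (layer, rest) node
      pvBfsA adjD n s.1 s.2

-- tail: `max(layer.values(), default=0)` then assign unreachable nodes increasing columns
def pvTail (layer : PySem.Dict String Int) (all_nodes : List String) : List (String × Int) :=
  let maxLayer := PySem.List.maxD layer.values (fun v => v) 0
  (all_nodes.foldl
    (fun s n => if s.2.contains n then s else (s.1 + 1, s.2.insert n (s.1 + 1)))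
    (maxLayer, layer)).2.items

def bfs_layers_py (source : String) (adj : List (String × List (String × String))) (all_nodes : List String) : List (String × Int) :=
  let adjD := PySem.Dict.mk adj
  let layer := pvBfsA adjD (1 + (adj.map (fun p => p.2.length)).sum)
                 (PySem.Dict.mk [(source, 0)]) [source]
  pvTail layer all_nodes

-- ===== PORT B =====
-- `if v not in seen: seen.add(v); <list>.append(v)` — shared by expand's inner loop and the
-- missing-node loop; state = (appended list, seen set)
def pvFresh (t : List String × PySem.Set String) (v : String) :
    List String × PySem.Set String :=
  if PySem.Set.contains t.2 v then t else (t.1 ++ [v], PySem.Set.add t.2 v)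

-- the two nested `for` loops of expand building nxt from one frontier node
def pvGather (adjD : PySem.Dict String (List (String × String)))
    (t : List String × PySem.Set String) (u : String) : List String × PySem.Set String :=
  (pvNbrs adjD u).foldl pvFresh t

-- recursive `expand(frontier, seen, level)` with fuel (the recursion deepens only while fresh
-- nodes appear, so 1 + total neighbor-entry count suffices and the 0-fuel branch is unreachable);
-- returns (pair list of the deeper levels, depth, seen)
def pvExpand (adjD : PySem.Dict String (List (String × String))) :
    Nat → List String → PySem.Set String → Int →
    List (String × Int) × Int × PySem.Set String
  | 0, frontier, seen, level =>
      let st := frontier.foldl (pvGather adjD) ([], seen)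
      ([], level, st.2)
  | n + 1, frontier, seen, level =>
      let st := frontier.foldl (pvGather adjD) ([], seen)
      if st.1.isEmpty then ([], level, st.2)
      else
        let r := pvExpand adjD n st.1 st.2 (level + 1)
        (st.1.map (fun v => (v, level + 1)) ++ r.1, r.2.1, r.2.2)

-- `dict(pairs + tagged)` is returned as the pair list itself: its keys are distinct by
-- construction (every key was admitted through the seen set exactly once)
def bfs_layers_py_alt (source : String) (adj : List (String × List (String × String))) (all_nodes : List String) : List (String × Int) :=
  let adjD := PySem.Dict.mk adj
  let r := pvExpand adjD (1 + (adj.map (fun p => p.2.length)).sum) [source]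
             (PySem.Set.add PySem.Set.empty source) 0
  let m := all_nodes.foldl pvFresh ([], r.2.2)
  ((source, (0 : Int)) :: r.1) ++
    (PySem.List.enumerate m.1).map (fun p => (p.2, r.2.1 + 1 + p.1))

-- ===== PRECONDITION & SPEC =====
def Spec_bfs_layers_py (source : String) (adj : List (String × List (String × String))) (all_nodes : List String) (out : List (String × Int)) : Prop := out = bfs_layers_py_alt source adj all_nodes
instance (source : String) (adj : List (String × List (String × String))) (all_nodes : List String) (out : List (String × Int)) : Decidable (Spec_bfs_layers_py source adj all_nodes out) := by unfold Spec_bfs_layers_py; infer_instance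

-- ===== CLAIM (what is proved, stated in full; the proofs are below) =====
def Claim_equal_bfs_layers_py : Prop := ∀ (source : String) (adj : List (String × List (String × String))) (all_nodes : List String), Dom_bfs_layers_py source adj all_nodes → Spec_bfs_layers_py source adj all_nodes (bfs_layers_py source adj all_nodes)

-- ===== LEMMAS AND PROOFS =====

-- the dict side (A) and the set side (B) know the same nodes
def pvRel (L : PySem.Dict String Int) (s : PySem.Set String) : Prop :=
  ∀ x, L.contains x = PySem.Set.contains s x

-- A's inner insertion step with the literal value w (= layer[node] + 1 at visit time)
def pvInsW (w : Int) (t : PySem.Dict String Int × List String) (v : String) :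
    PySem.Dict String Int × List String :=
  if t.1.contains v then t else (t.1.insert v w, t.2 ++ [v])

-- the pool of all nodes BFS can ever discover: every neighbor key, deduplicated
def pvPool (adjD : PySem.Dict String (List (String × String))) : List String :=
  (adjD.items.flatMap (fun p => p.2.map Prod.fst)).dedup

-- undiscovered potential nodes: pool members not yet in layer
def pvU (adjD : PySem.Dict String (List (String × String))) (L : PySem.Dict String Int) : Nat :=
  ((pvPool adjD).filter (fun x => !(L.contains x))).length

lemma pvContains_of_get? {d : PySem.Dict String Int} {x : String} {v : Int}
    (h : d.get? x = some v) : d.contains x = true := by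
  rw [PySem.Dict.contains_eq_isSome_get?, h]; rfl

lemma pvGet?_of_contains {d : PySem.Dict String Int} {x : String}
    (h : d.contains x = true) : ∃ v, d.get? x = some v := by
  rw [PySem.Dict.contains_eq_isSome_get?] at h
  exact Option.isSome_iff_exists.mp h

lemma pvNbrs_subset_pool (adjD : PySem.Dict String (List (String × String)))
    (node : String) : ∀ x ∈ pvNbrs adjD node, x ∈ pvPool adjD := by
  intro x hx
  unfold pvNbrs at hx
  rcases hget : adjD.get? node with _ | v
  · rw [PySem.Dict.getD_eq_get?_getD, hget] at hx
    simp at hx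
  · rw [PySem.Dict.getD_eq_get?_getD, hget] at hx
    have hmem := PySem.Dict.mem_items_of_get?_eq_some _ hget
    unfold pvPool
    rw [List.mem_dedup]
    exact List.mem_flatMap.mpr ⟨(node, v), hmem, by simpa using hx⟩

lemma pvPartition (l : List String) (p q : String → Bool) (hq : ∀ x, q x = !p x) :
    (l.filter p).length + (l.filter q).length = l.length := by
  induction l with
  | nil => simp
  | cons a t ih => cases h : p a <;> simp [h, hq] <;> omega

lemma pvNodupSubsetLen (l1 l2 : List String) (h : l1.Nodup) (hs : l1 ⊆ l2) :
    l1.length ≤ l2.length := by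
  calc l1.length = l1.toFinset.card := (List.toFinset_card_of_nodup h).symm
    _ ≤ l2.toFinset.card := Finset.card_le_card (fun x hx => by
        simp only [List.mem_toFinset] at *; exact hs hx)
    _ ≤ l2.length := l2.toFinset_card_le

-- counting: the undiscovered pool shrinks by at least the number of newly discovered nodes
lemma pvU_drop (adjD : PySem.Dict String (List (String × String)))
    (L L' : PySem.Dict String Int) (new : List String) (hnd : new.Nodup)
    (hnew : ∀ x ∈ new, x ∈ pvPool adjD ∧ L.contains x = false ∧ L'.contains x = true)
    (hmono : ∀ x, L.contains x = true → L'.contains x = true) :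
    pvU adjD L' + new.length ≤ pvU adjD L := by
  have hsub : new ⊆ ((pvPool adjD).filter (fun x => !(L.contains x))).filter
      (fun x => L'.contains x) := by
    intro x hx
    obtain ⟨hp, hnc, hc⟩ := hnew x hx
    simp [List.mem_filter, hp, hnc, hc]
  have h1 : new.length ≤ (((pvPool adjD).filter (fun x => !(L.contains x))).filter
      (fun x => L'.contains x)).length := pvNodupSubsetLen _ _ hnd hsub
  have h2 : ((pvPool adjD).filter (fun x => !(L.contains x))).filter
      (fun x => !(L'.contains x)) = (pvPool adjD).filter (fun x => !(L'.contains x)) := by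
    rw [List.filter_filter]
    apply List.filter_congr
    intro a _
    cases hL : L.contains a
    · simp
    · simp [hmono a hL]
  have h3 := pvPartition ((pvPool adjD).filter (fun x => !(L.contains x)))
    (fun x => L'.contains x) (fun x => !(L'.contains x)) (fun x => rfl)
  unfold pvU
  rw [← h2]
  omega

-- the pool is no larger than the total neighbor-entry count (used to justify the fuel)
lemma pvU_le (adjD : PySem.Dict String (List (String × String))) (L : PySem.Dict String Int) :
    pvU adjD L ≤ ((adjD.items).map (fun p => p.2.length)).sum := by
  unfold pvU pvPool
  calc (((adjD.items.flatMap (fun p => p.2.map Prod.fst)).dedup).filter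
        (fun x => !(L.contains x))).length
      ≤ ((adjD.items.flatMap (fun p => p.2.map Prod.fst)).dedup).length :=
        List.length_filter_le _ _
    _ ≤ (adjD.items.flatMap (fun p => p.2.map Prod.fst)).length :=
        (List.dedup_sublist _).length_le
    _ = ((adjD.items).map (fun p => p.2.length)).sum := by
        simp [List.length_flatMap]

-- a fold whose step only appends to the buffer commutes with a prefix of the buffer
lemma pvFoldShift {α : Type} (step : (PySem.Dict String Int × List String) → α →
      (PySem.Dict String Int × List String)) (b : List String)
    (hstep : ∀ L c x, step (L, b ++ c) x = ((step (L, c) x).1, b ++ (step (L, c) x).2))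
    (l : List α) : ∀ (L : PySem.Dict String Int) (c : List String),
      l.foldl step (L, b ++ c) =
      ((l.foldl step (L, c)).1, b ++ (l.foldl step (L, c)).2) := by
  induction l with
  | nil => intro L c; rfl
  | cons x xs ih =>
    intro L c
    simp only [List.foldl_cons, hstep L c x]
    have h2 := ih (step (L, c) x).1 (step (L, c) x).2
    simpa using h2

lemma pvStepA_shift (adjD : PySem.Dict String (List (String × String)))
    (L : PySem.Dict String Int) (b c : List String) (x : String) :
    pvStepA adjD (L, b ++ c) x = ((pvStepA adjD (L, c) x).1, b ++ (pvStepA adjD (L, c) x).2) := by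
  unfold pvStepA
  refine pvFoldShift _ b ?_ _ L c
  intro L' c' nb
  by_cases h : L'.contains nb = true <;> simp [h, List.append_assoc]

-- B's pvFresh fold also only appends to its list component
lemma pvFreshShift (l : List String) : ∀ (acc c : List String) (s : PySem.Set String),
    l.foldl pvFresh (acc ++ c, s) =
      (acc ++ (l.foldl pvFresh (c, s)).1, (l.foldl pvFresh (c, s)).2) := by
  induction l with
  | nil => intro acc c s; rfl
  | cons v vs ih =>
    intro acc c s
    by_cases h : PySem.Set.contains s v = true
    · simp only [List.foldl_cons, pvFresh, if_pos h]
      exact ih acc c s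
    · simp only [List.foldl_cons, pvFresh, if_neg h, List.append_assoc]
      exact ih acc (c ++ [v]) (PySem.Set.add s v)

-- small-step equations for the fueled loop of A
lemma pvBfsA_nil (adjD : PySem.Dict String (List (String × String))) (n : Nat)
    (L : PySem.Dict String Int) : pvBfsA adjD n L [] = L := by
  cases n <;> rfl

-- queue BFS processes a whole segment q of the queue: the split lemma
lemma pvBfsA_split (adjD : PySem.Dict String (List (String × String))) (q : List String) :
    ∀ (t : List String) (L : PySem.Dict String Int) (n : Nat),
      pvBfsA adjD (q.length + n) L (q ++ t) =
        pvBfsA adjD n (q.foldl (pvStepA adjD) (L, t)).1 (q.foldl (pvStepA adjD) (L, t)).2 := by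
  induction q with
  | nil => intro t L n; simp
  | cons node rest ih =>
    intro t L n
    have hlen : (node :: rest).length + n = (rest.length + n) + 1 := by
      simp [List.length_cons]; omega
    rw [hlen]
    show pvBfsA adjD ((rest.length + n) + 1) L (node :: (rest ++ t)) = _
    rw [show pvBfsA adjD ((rest.length + n) + 1) L (node :: (rest ++ t)) =
        pvBfsA adjD (rest.length + n) (pvStepA adjD (L, rest ++ t) node).1
          (pvStepA adjD (L, rest ++ t) node).2 from rfl]
    rw [pvStepA_shift adjD L rest t node]
    have h2 := ih (pvStepA adjD (L, t) node).2 (pvStepA adjD (L, t) node).1 n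
    simpa [List.foldl_cons] using h2

-- visiting one node: A's step (value layer[node]+1) = the literal step pvInsW, with bookkeeping
lemma pvVisit_aux (node : String) (ns : List String) :
    ∀ (L : PySem.Dict String Int) (buf : List String) (lvl : Int),
    L.keys.Nodup → L.get? node = some lvl →
    (ns.foldl (fun s nb => if s.1.contains nb then s
        else (s.1.insert nb (s.1.getD node 0 + 1), s.2 ++ [nb])) (L, buf) =
     ns.foldl (pvInsW (lvl + 1)) (L, buf)) ∧
    (ns.foldl (fun s nb => if s.1.contains nb then s
        else (s.1.insert nb (s.1.getD node 0 + 1), s.2 ++ [nb])) (L, buf)).1.keys.Nodup ∧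
    (∀ x v, L.get? x = some v → (ns.foldl (fun s nb => if s.1.contains nb then s
        else (s.1.insert nb (s.1.getD node 0 + 1), s.2 ++ [nb])) (L, buf)).1.get? x = some v) := by
  induction ns with
  | nil =>
    intro L buf lvl h1 _
    exact ⟨rfl, h1, fun x v hv => hv⟩
  | cons nb rest ih =>
    intro L buf lvl h1 h2
    by_cases h : L.contains nb = true
    · simp only [List.foldl_cons, pvInsW, if_pos h]
      obtain ⟨heq, hnd, hpers⟩ := ih L buf lvl h1 h2
      exact ⟨by simpa [pvInsW] using heq, hnd, hpers⟩
    · have hne : node ≠ nb := by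
        intro he; exact h (he ▸ pvContains_of_get? h2)
      have hvalnode : L.getD node 0 = lvl := by
        rw [PySem.Dict.getD_eq_get?_getD, h2]; rfl
      simp only [List.foldl_cons, pvInsW, if_neg h, hvalnode]
      have h1' : (L.insert nb (lvl + 1)).keys.Nodup := PySem.Dict.nodup_keys_insert _ _ _ h1
      have h2' : (L.insert nb (lvl + 1)).get? node = some lvl := by
        rw [PySem.Dict.get?_insert_of_ne _ _ hne]; exact h2
      obtain ⟨heq, hnd, hpers⟩ := ih (L.insert nb (lvl + 1)) (buf ++ [nb]) lvl h1' h2'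
      refine ⟨by simpa [pvInsW] using heq, hnd, ?_⟩
      intro x v hv
      have hxne : x ≠ nb := by
        intro he; exact h (he ▸ pvContains_of_get? hv)
      exact hpers x v (by rw [PySem.Dict.get?_insert_of_ne _ _ hxne]; exact hv)

-- A's fold over a frontier whose nodes all sit at level lvl = the flat literal fold
lemma pvLevelFlat (adjD : PySem.Dict String (List (String × String))) (f : List String) :
    ∀ (L : PySem.Dict String Int) (buf : List String) (lvl : Int),
    L.keys.Nodup → (∀ x ∈ f, L.get? x = some lvl) →
    f.foldl (pvStepA adjD) (L, buf) =
      (f.flatMap (pvNbrs adjD)).foldl (pvInsW (lvl + 1)) (L, buf) := by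
  induction f with
  | nil => intro L buf lvl _ _; rfl
  | cons node rest ih =>
    intro L buf lvl h1 h2
    obtain ⟨heq, hnd, hpers⟩ :=
      pvVisit_aux node (pvNbrs adjD node) L buf lvl h1 (h2 node List.mem_cons_self)
    have hstep : pvStepA adjD (L, buf) node =
        (pvNbrs adjD node).foldl (pvInsW (lvl + 1)) (L, buf) := heq
    rw [List.foldl_cons, List.flatMap_cons, List.foldl_append, ← hstep]
    have hstep' : pvStepA adjD (L, buf) node =
        (pvNbrs adjD node).foldl (fun s nb => if s.1.contains nb then s
          else (s.1.insert nb (s.1.getD node 0 + 1), s.2 ++ [nb])) (L, buf) := rfl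
    have h2' : ∀ x ∈ rest, (pvStepA adjD (L, buf) node).1.get? x = some lvl := by
      intro x hx
      rw [hstep']
      exact hpers x lvl (h2 x (List.mem_cons_of_mem _ hx))
    have h1' : (pvStepA adjD (L, buf) node).1.keys.Nodup := by rw [hstep']; exact hnd
    have := ih (pvStepA adjD (L, buf) node).1 (pvStepA adjD (L, buf) node).2 lvl h1' h2'
    simpa using this

-- B's fold over a frontier = the flat pvFresh fold
lemma pvGatherFlat (adjD : PySem.Dict String (List (String × String))) (f : List String) :
    ∀ (acc : List String) (s : PySem.Set String),
    f.foldl (pvGather adjD) (acc, s) = (f.flatMap (pvNbrs adjD)).foldl pvFresh (acc, s) := by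
  induction f with
  | nil => intro acc s; rfl
  | cons node rest ih =>
    intro acc s
    rw [List.foldl_cons, List.flatMap_cons, List.foldl_append]
    have : pvGather adjD (acc, s) node = (pvNbrs adjD node).foldl pvFresh (acc, s) := rfl
    rw [this]
    exact ih _ _

-- the core correspondence: the literal dict fold (A) and the set fold (B) discover the SAME
-- fresh nodes `new`, in the same order, and keep the two sides related
lemma pvCorr (w : Int) (ns : List String) :
    ∀ (L : PySem.Dict String Int) (buf acc : List String) (s : PySem.Set String),
    L.keys.Nodup → pvRel L s →
    ∃ new : List String,
      (ns.foldl (pvInsW w) (L, buf)).2 = buf ++ new ∧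
      (ns.foldl pvFresh (acc, s)).1 = acc ++ new ∧
      (ns.foldl (pvInsW w) (L, buf)).1.items = L.items ++ new.map (fun v => (v, w)) ∧
      pvRel (ns.foldl (pvInsW w) (L, buf)).1 (ns.foldl pvFresh (acc, s)).2 ∧
      (ns.foldl (pvInsW w) (L, buf)).1.keys.Nodup ∧
      new.Nodup ∧
      (∀ x ∈ new, x ∈ ns ∧ L.contains x = false ∧
        (ns.foldl (pvInsW w) (L, buf)).1.get? x = some w) ∧
      (∀ x v, L.get? x = some v → (ns.foldl (pvInsW w) (L, buf)).1.get? x = some v) ∧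
      (∀ x, (ns.foldl (pvInsW w) (L, buf)).1.contains x = true →
        L.contains x = true ∨ x ∈ new) := by
  induction ns with
  | nil =>
    intro L buf acc s h1 hrel
    exact ⟨[], by simp, by simp, by simp, hrel, h1, by simp, by simp,
      fun x v hv => hv, fun x hx => Or.inl hx⟩
  | cons v vs ih =>
    intro L buf acc s h1 hrel
    by_cases h : L.contains v = true
    · have hs : PySem.Set.contains s v = true := by rw [← hrel]; exact h
      simp only [List.foldl_cons, pvInsW, pvFresh, if_pos h, if_pos hs]
      obtain ⟨new, hbuf, hacc, hitems, hrel', hnd, hnodup, hprops, hpers, hback⟩ :=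
        ih L buf acc s h1 hrel
      exact ⟨new, hbuf, hacc, hitems, hrel', hnd, hnodup,
        fun x hx => ⟨List.mem_cons_of_mem _ (hprops x hx).1, (hprops x hx).2.1,
          (hprops x hx).2.2⟩, hpers, hback⟩
    · have hb : L.contains v = false := by simpa using h
      have hs : PySem.Set.contains s v = false := by rw [← hrel]; exact hb
      have hsn : ¬ PySem.Set.contains s v = true := by rw [hs]; exact Bool.false_ne_true
      simp only [List.foldl_cons, pvInsW, pvFresh, if_neg h, if_neg hsn]
      have hvnotmem : v ∉ s := by
        intro hv
        exact hsn ((PySem.Set.contains_iff s v).mpr hv)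
      have hadd : PySem.Set.add s v = s ++ [v] := by
        rw [PySem.Set.add_eq_ite, if_neg hvnotmem]
      have hrel' : pvRel (L.insert v w) (PySem.Set.add s v) := by
        intro x
        rw [PySem.Dict.contains_insert, hadd]
        by_cases hxv : x = v
        · have hcv : PySem.Set.contains (s ++ [v]) v = true :=
            (PySem.Set.contains_iff _ _).mpr (by simp)
          rw [hxv, hcv]
          simp
        · have hxvb : (x == v) = false := by simp [hxv]
          have hsplit : PySem.Set.contains (s ++ [v]) x = PySem.Set.contains s x := by
            rw [Bool.eq_iff_iff, PySem.Set.contains_iff, PySem.Set.contains_iff]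
            simp [hxv]
          rw [hxvb, hsplit, ← hrel x]
          simp
      have h1' : (L.insert v w).keys.Nodup := PySem.Dict.nodup_keys_insert _ _ _ h1
      obtain ⟨new, hbuf, hacc, hitems, hrelF, hnd, hnodup, hprops, hpers, hback⟩ :=
        ih (L.insert v w) (buf ++ [v]) (acc ++ [v]) (PySem.Set.add s v) h1' hrel'
      have hitemsv : (L.insert v w).items = L.items ++ [(v, w)] :=
        PySem.Dict.items_insert_of_not_contains _ _ hb
      refine ⟨v :: new, ?_, ?_, ?_, hrelF, hnd, ?_, ?_, ?_, ?_⟩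
      · rw [hbuf, List.append_assoc]; rfl
      · rw [hacc, List.append_assoc]; rfl
      · rw [hitems, hitemsv, List.append_assoc]; rfl
      · refine List.nodup_cons.mpr ⟨?_, hnodup⟩
        intro hmem
        have hc := (hprops v hmem).2.1
        rw [PySem.Dict.contains_insert] at hc
        simp at hc
      · intro x hx
        rcases List.mem_cons.mp hx with rfl | hx'
        · exact ⟨List.mem_cons_self, hb,
            hpers x w (PySem.Dict.get?_insert_self _ _ _)⟩
        · obtain ⟨hin, hcon, hget⟩ := hprops x hx'
          refine ⟨List.mem_cons_of_mem _ hin, ?_, hget⟩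
          rw [PySem.Dict.contains_insert] at hcon
          simp at hcon
          exact hcon.2
      · intro x u hu
        have hxne : x ≠ v := by
          intro he; exact h (he ▸ pvContains_of_get? hu)
        exact hpers x u (by rw [PySem.Dict.get?_insert_of_ne _ _ hxne]; exact hu)
      · intro x hx
        rcases hback x hx with hc | hmem
        · rw [PySem.Dict.contains_insert] at hc
          rcases Bool.or_eq_true_iff.mp hc with heq' | hc'
          · exact Or.inr (List.mem_cons.mpr (Or.inl (by simpa using heq')))
          · exact Or.inl hc'
        · exact Or.inr (List.mem_cons_of_mem _ hmem)

-- max(xs) with default for a list whose maximum is known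
lemma pvMaxD_eq (xs : List Int) (m : Int) (hm : m ∈ xs) (hub : ∀ v ∈ xs, v ≤ m) :
    PySem.List.maxD xs (fun v => v) 0 = m := by
  cases xs with
  | nil => simp at hm
  | cons x t =>
    unfold PySem.List.maxD
    rw [PySem.List.max?_id_cons]
    have h1 := PySem.List.le_foldl_max t x
    have hmem := PySem.List.foldl_max_mem t x
    have hle : List.foldl max x t ≤ m := by
      rcases hmem with he | hmem'
      · rw [he]; exact hub x List.mem_cons_self
      · exact hub _ (List.mem_cons_of_mem _ hmem')
    have hge : m ≤ List.foldl max x t := by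
      rcases List.mem_cons.mp hm with rfl | hm'
      · exact h1.1
      · exact h1.2 m hm'
    simpa using le_antisymm hle hge

-- the main induction: A's queue BFS and B's recursive expansion agree — item list, seen set
-- relation, and the recursion's depth is the maximum stored column
lemma pvMain (adjD : PySem.Dict String (List (String × String))) :
    ∀ (fB fA : Nat) (L : PySem.Dict String Int) (f : List String) (lvl : Int)
      (s : PySem.Set String),
    L.keys.Nodup → (∀ x ∈ f, L.get? x = some lvl) → pvRel L s →
    (∀ v ∈ L.values, v ≤ lvl) → lvl ∈ L.values →
    f.length + pvU adjD L ≤ fA → pvU adjD L + 1 ≤ fB →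
    (pvBfsA adjD fA L f).items = L.items ++ (pvExpand adjD fB f s lvl).1 ∧
    pvRel (pvBfsA adjD fA L f) (pvExpand adjD fB f s lvl).2.2 ∧
    (pvExpand adjD fB f s lvl).2.1 ∈ (pvBfsA adjD fA L f).values ∧
    (∀ v ∈ (pvBfsA adjD fA L f).values, v ≤ (pvExpand adjD fB f s lvl).2.1) := by
  intro fB
  induction fB with
  | zero => intro fA L f lvl s _ _ _ _ _ _ hB; omega
  | succ m ih =>
    intro fA L f lvl s hnd hf hrel hub hin hfA hfB
    cases f with
    | nil =>
      rw [pvBfsA_nil]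
      have hexp : pvExpand adjD (m + 1) [] s lvl = ([], lvl, s) := by
        simp [pvExpand]
      rw [hexp]
      exact ⟨by simp, hrel, hin, hub⟩
    | cons node rest =>
      have hflatB := pvGatherFlat adjD (node :: rest) [] s
      obtain ⟨new, hbuf, hacc, hitems, hrelF, hndF, hnodup, hprops, hpers, hback⟩ :=
        pvCorr (lvl + 1) ((node :: rest).flatMap (pvNbrs adjD)) L [] [] s hnd hrel
      have hflatA := pvLevelFlat adjD (node :: rest) L [] lvl hnd hf
      -- A: split off the first |f| pops
      have hlen : (node :: rest).length ≤ fA := le_trans (Nat.le_add_right _ _) hfA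
      obtain ⟨n, hn⟩ := Nat.le.dest hlen
      rw [← hn]
      have hsplit := pvBfsA_split adjD (node :: rest) [] L n
      rw [List.append_nil] at hsplit
      rw [hsplit, hflatA]
      -- B: one unfolding of pvExpand
      have h0 : pvExpand adjD (m + 1) (node :: rest) s lvl =
          (if (((node :: rest).foldl (pvGather adjD) ([], s)).1).isEmpty
           then ([], lvl, ((node :: rest).foldl (pvGather adjD) ([], s)).2)
           else ((((node :: rest).foldl (pvGather adjD) ([], s)).1).map (fun v => (v, lvl + 1)) ++
                  (pvExpand adjD m (((node :: rest).foldl (pvGather adjD) ([], s)).1)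
                    (((node :: rest).foldl (pvGather adjD) ([], s)).2) (lvl + 1)).1,
                 (pvExpand adjD m (((node :: rest).foldl (pvGather adjD) ([], s)).1)
                    (((node :: rest).foldl (pvGather adjD) ([], s)).2) (lvl + 1)).2.1,
                 (pvExpand adjD m (((node :: rest).foldl (pvGather adjD) ([], s)).1)
                    (((node :: rest).foldl (pvGather adjD) ([], s)).2) (lvl + 1)).2.2)) := rfl
      rw [hflatB] at h0
      set ns := (node :: rest).flatMap (pvNbrs adjD) with hns
      set AF := ns.foldl (pvInsW (lvl + 1)) (L, ([] : List String)) with hAF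
      set BF := ns.foldl pvFresh (([] : List String), s) with hBF
      have hq : AF.2 = new := by rw [hbuf]; rfl
      have hst1 : BF.1 = new := by rw [hacc]; rfl
      have hUd : pvU adjD AF.1 + new.length ≤ pvU adjD L := by
        refine pvU_drop adjD L AF.1 new hnodup ?_ ?_
        · intro x hx
          obtain ⟨hin', hco, hget⟩ := hprops x hx
          obtain ⟨u, hu, hxu⟩ := List.mem_flatMap.mp hin'
          exact ⟨pvNbrs_subset_pool adjD u x hxu, hco, pvContains_of_get? hget⟩
        · intro x hx
          obtain ⟨u, hu⟩ := pvGet?_of_contains hx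
          exact pvContains_of_get? (hpers x u hu)
      rw [hst1] at h0
      cases hnew : new with
      | nil =>
        -- nothing discovered: A's layer is unchanged, B stops with depth lvl
        have hLeq : AF.1 = L := by
          apply PySem.Dict.ext
          rw [hitems, hnew]
          simp
        rw [hnew] at h0
        simp only [List.isEmpty_nil, if_true] at h0
        rw [h0, hq, hnew, pvBfsA_nil, hLeq]
        exact ⟨by simp, by rw [← hLeq]; exact hrelF, hin, hub⟩
      | cons y ys =>
        -- fresh nodes: recurse one level deeper on both sides
        have hie : new.isEmpty = false := by rw [hnew]; rfl
        rw [hie] at h0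
        simp only [Bool.false_eq_true, if_false] at h0
        rw [h0, hq]
        have hvalAF : AF.1.values = L.values ++ new.map (fun _ => lvl + 1) := by
          show (AF.1.items).map (fun x => x.2) = _
          rw [hitems, List.map_append, List.map_map]
          rfl
        have hub' : ∀ v ∈ AF.1.values, v ≤ lvl + 1 := by
          intro v hv
          rw [hvalAF] at hv
          rcases List.mem_append.mp hv with hv' | hv'
          · exact le_trans (hub v hv') (by omega)
          · rcases List.mem_map.mp hv' with ⟨_, _, rfl⟩
            exact le_refl _
        have hin' : lvl + 1 ∈ AF.1.values := by
          rw [hvalAF]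
          refine List.mem_append.mpr (Or.inr ?_)
          exact List.mem_map.mpr ⟨y, by rw [hnew]; exact List.mem_cons_self, rfl⟩
        have hlen1 : 1 ≤ new.length := by rw [hnew]; simp
        have hUle : pvU adjD L ≤ n := by
          rw [← hn] at hfA
          omega
        obtain ⟨ihitems, ihrel, ihdep, ihub⟩ :=
          ih n AF.1 new (lvl + 1) BF.2 hndF
            (fun x hx => (hprops x hx).2.2) hrelF hub' hin'
            (by omega) (by omega)
        refine ⟨?_, ihrel, ihdep, ihub⟩
        rw [ihitems, hitems, List.append_assoc]

-- the tail loops: A's counter/insert fold over all_nodes = B's missing list, enumerated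
def pvTag : Int → List String → List (String × Int)
  | _, [] => []
  | m, x :: xs => (x, m + 1) :: pvTag (m + 1) xs

lemma pvTag_eq : ∀ (xs : List String) (m s : Int),
    pvTag m xs = (PySem.List.enumerate xs s).map (fun p => (p.2, m + 1 - s + p.1)) := by
  intro xs
  induction xs with
  | nil => intro m s; simp [pvTag, PySem.List.enumerate]
  | cons x t ih =>
    intro m s
    rw [PySem.List.enumerate_cons]
    show (x, m + 1) :: pvTag (m + 1) t = (x, m + 1 - s + s) :: _
    rw [ih (m + 1) (s + 1)]
    congr 1
    · congr 1; omega
    · apply List.map_congr_left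
      intro p _
      congr 1
      omega

lemma pvTag_eq0 (xs : List String) (m : Int) :
    pvTag m xs = (PySem.List.enumerate xs).map (fun p => (p.2, m + 1 + p.1)) := by
  rw [pvTag_eq xs m 0]
  apply List.map_congr_left
  intro p _
  congr 1
  omega

lemma pvTailCorr : ∀ (ns : List String) (m : Int) (L : PySem.Dict String Int)
    (s : PySem.Set String), pvRel L s →
    ((ns.foldl (fun t n => if t.2.contains n then t else (t.1 + 1, t.2.insert n (t.1 + 1)))
        (m, L)).2).items
      = L.items ++ pvTag m (ns.foldl pvFresh (([] : List String), s)).1 := by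
  intro ns
  induction ns with
  | nil => intro m L s _; simp [pvTag]
  | cons n rest ih =>
    intro m L s hrel
    by_cases h : L.contains n = true
    · have hs : PySem.Set.contains s n = true := by rw [← hrel]; exact h
      simp only [List.foldl_cons, pvFresh, if_pos h, if_pos hs]
      exact ih m L s hrel
    · have hb : L.contains n = false := by simpa using h
      have hs : ¬ PySem.Set.contains s n = true := by rw [← hrel, hb]; simp
      simp only [List.foldl_cons, pvFresh, if_neg h, if_neg hs]
      have hvnm : n ∉ s := fun hv => hs ((PySem.Set.contains_iff s n).mpr hv)
      have hadd : PySem.Set.add s n = s ++ [n] := by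
        rw [PySem.Set.add_eq_ite, if_neg hvnm]
      have hrel' : pvRel (L.insert n (m + 1)) (PySem.Set.add s n) := by
        intro x
        rw [PySem.Dict.contains_insert, hadd]
        by_cases hxv : x = n
        · have hcv : PySem.Set.contains (s ++ [n]) n = true :=
            (PySem.Set.contains_iff _ _).mpr (by simp)
          rw [hxv, hcv]
          simp
        · have hxvb : (x == n) = false := by simp [hxv]
          have hsplit : PySem.Set.contains (s ++ [n]) x = PySem.Set.contains s x := by
            rw [Bool.eq_iff_iff, PySem.Set.contains_iff, PySem.Set.contains_iff]
            simp [hxv]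
          rw [hxvb, hsplit, ← hrel x]
          simp
      have ihc := ih (m + 1) (L.insert n (m + 1)) (PySem.Set.add s n) hrel'
      have hshift0 := pvFreshShift rest [n] [] (PySem.Set.add s n)
      rw [List.append_nil] at hshift0
      rw [ihc, PySem.Dict.items_insert_of_not_contains _ _ hb]
      simp only [List.nil_append]
      rw [hshift0]
      show L.items ++ [(n, m + 1)] ++ _ = L.items ++ pvTag m (n :: _)
      rw [List.append_assoc]
      rfl

-- ===== VERDICT (by name: the statement is the Claim_ definition above) =====
theorem bfs_layers_py_spec : Claim_equal_bfs_layers_py := by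
  unfold Claim_equal_bfs_layers_py Spec_bfs_layers_py
  intro source adj all_nodes _
  have hA : bfs_layers_py source adj all_nodes =
      pvTail (pvBfsA (PySem.Dict.mk adj) (1 + (adj.map (fun p => p.2.length)).sum)
        (PySem.Dict.mk [(source, 0)]) [source]) all_nodes := rfl
  have hB : bfs_layers_py_alt source adj all_nodes =
      ((source, (0 : Int)) ::
        (pvExpand (PySem.Dict.mk adj) (1 + (adj.map (fun p => p.2.length)).sum) [source]
          (PySem.Set.add PySem.Set.empty source) 0).1) ++
      (PySem.List.enumerate
        ((all_nodes.foldl pvFresh ([],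
          (pvExpand (PySem.Dict.mk adj) (1 + (adj.map (fun p => p.2.length)).sum) [source]
            (PySem.Set.add PySem.Set.empty source) 0).2.2)).1)).map
        (fun p => (p.2,
          (pvExpand (PySem.Dict.mk adj) (1 + (adj.map (fun p => p.2.length)).sum) [source]
            (PySem.Set.add PySem.Set.empty source) 0).2.1 + 1 + p.1)) := rfl
  rw [hA, hB]
  set adjD := PySem.Dict.mk adj with hadjD
  set fuel := 1 + (adj.map (fun p => p.2.length)).sum with hfuel
  set L0 := PySem.Dict.mk [(source, (0 : Int))] with hL0
  set s0 := PySem.Set.add PySem.Set.empty source with hs0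
  have h1 : L0.keys.Nodup := by simp [hL0, PySem.Dict.keys_mk]
  have h2 : ∀ x ∈ [source], L0.get? x = some 0 := by
    intro x hx
    simp only [List.mem_singleton] at hx
    subst hx
    simp [hL0, PySem.Dict.get?_mk_cons]
  have hrel0 : pvRel L0 s0 := by
    intro x
    have hset : s0 = [source] := rfl
    rw [hset, PySem.Dict.contains_eq_decide_mem_keys, Bool.eq_iff_iff,
      PySem.Set.contains_iff]
    simp [hL0, PySem.Dict.keys_mk]
  have hval0 : L0.values = [0] := rfl
  have hub0 : ∀ v ∈ L0.values, v ≤ 0 := by rw [hval0]; intro v hv; simp at hv; omega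
  have hin0 : (0 : Int) ∈ L0.values := by rw [hval0]; simp
  have hu := pvU_le adjD L0
  have hitemsAdj : adjD.items = adj := rfl
  rw [hitemsAdj] at hu
  obtain ⟨hitems, hrelF, hdep, hubF⟩ :=
    pvMain adjD fuel fuel L0 [source] 0 s0 h1 h2 hrel0 hub0 hin0
      (by simp only [List.length_singleton]; omega) (by omega)
  set Lfin := pvBfsA adjD fuel L0 [source] with hLfin
  set r := pvExpand adjD fuel [source] s0 0 with hr
  have hmax : PySem.List.maxD Lfin.values (fun v => v) 0 = r.2.1 :=
    pvMaxD_eq _ _ hdep hubF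
  have hT : pvTail Lfin all_nodes =
      ((all_nodes.foldl
        (fun s n => if s.2.contains n then s else (s.1 + 1, s.2.insert n (s.1 + 1)))
        (PySem.List.maxD Lfin.values (fun v => v) 0, Lfin)).2).items := rfl
  rw [hT, hmax]
  rw [pvTailCorr all_nodes r.2.1 Lfin r.2.2 hrelF]
  rw [hitems]
  have hL0items : L0.items = [(source, (0 : Int))] := rfl
  rw [hL0items]
  rw [pvTag_eq0]
  rfl
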